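-- pv_equiv track=rewrite | github.com/peanutprotocol/peanut-contracts | deploy_check.py | check_missing_deployments
-- ===== SOURCE A (Python) =====
-- def categorize_chains(contracts_json):
--     mainnets, testnets = {}, {}
--     for chain_id, contracts in contracts_json.items():
--         if contracts.get("mainnet") == "true":
--             mainnets[chain_id] = contracts
--         else:
--             testnets[chain_id] = contracts
--     return mainnets, testnets
--
-- def check_missing_deployments(contracts_json, expected_versions):
--     missing_deployments = {version: {"mainnets": [], "testnets": []} for version in expected_versions}
--     mainnets, testnets = categorize_chains(contracts_json)
--
--     for category, chains in [("mainnets", mainnets), ("testnets", testnets)]: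
--         for chain_id, contracts in chains.items():
--             deployed_versions = set(contracts.keys()) - {"name", "mainnet"}
--             missing_versions = expected_versions - deployed_versions
--             for version in missing_versions:
--                 missing_deployments[version][category].append(contracts.get("name", f"Chain ID {chain_id}"))
--
--     return missing_deployments
-- ===== SOURCE B (Python) =====
-- def check_missing_deployments(contracts_json, expected_versions):
--     def bucket(version, want_mainnet):
--         return [
--             contracts.get("name", f"Chain ID {chain_id}")
--             for chain_id, contracts in contracts_json.items()
--             if ((contracts.get("mainnet") == "true") == want_mainnet)
--             and version not in set(contracts.keys()) - {"name", "mainnet"}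
--         ]
--     return {
--         version: {"mainnets": bucket(version, True), "testnets": bucket(version, False)}
--         for version in expected_versions
--     }
-- ===== Notes on version B (the rewrite author's own statement) =====
-- stated objective: simpler
-- what changed: Replaces A's categorize-then-mutate design (split chains into two dicts, then chain-major nested loops appending into a pre-built mutable result dict) with a pure version-major dict comprehension that computes each bucket directly as a list comprehension over contracts_json, dropping the categorize_chains helper and all in-place mutation.
import Mathlib
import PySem

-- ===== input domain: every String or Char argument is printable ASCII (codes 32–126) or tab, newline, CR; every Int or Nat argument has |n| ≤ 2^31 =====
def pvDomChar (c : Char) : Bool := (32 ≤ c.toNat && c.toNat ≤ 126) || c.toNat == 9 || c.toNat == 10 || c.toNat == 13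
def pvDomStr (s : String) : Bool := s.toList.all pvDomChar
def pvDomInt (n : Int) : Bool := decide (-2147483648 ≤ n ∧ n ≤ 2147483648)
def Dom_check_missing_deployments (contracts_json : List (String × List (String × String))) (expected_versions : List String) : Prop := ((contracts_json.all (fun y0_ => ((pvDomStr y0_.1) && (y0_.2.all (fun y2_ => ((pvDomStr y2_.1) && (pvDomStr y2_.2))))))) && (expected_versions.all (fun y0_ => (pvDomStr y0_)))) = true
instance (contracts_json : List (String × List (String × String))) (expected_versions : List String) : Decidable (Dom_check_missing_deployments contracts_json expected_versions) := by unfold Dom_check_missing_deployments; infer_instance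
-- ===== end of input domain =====

-- B replaces A's categorize-then-mutate chain-major loops by a pure version-major
-- comprehension computing each bucket directly (objective: simpler).

-- shared helper: the expression `contracts.get("name", f"Chain ID {chain_id}")`,
-- which appears verbatim in both Pythons
def pvChainName (chain_id : String) (contracts : List (String × String)) : String :=
  PySem.Dict.getD (PySem.Dict.mk contracts) "name" ("Chain ID " ++ chain_id)

-- shared helper: the expression `set(contracts.keys()) - {"name", "mainnet"}`,
-- which appears verbatim in both Pythons
def pvDeployed (contracts : List (String × String)) : PySem.Set String :=
  PySem.Set.diff (PySem.Set.ofList (PySem.Dict.keys (PySem.Dict.mk contracts)))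
    (PySem.Set.ofList ["name", "mainnet"])

-- ===== PORT A =====
def categorize_chains (contracts_json : List (String × List (String × String))) :
    PySem.Dict String (List (String × String)) × PySem.Dict String (List (String × String)) :=
  contracts_json.foldl
    (fun mt kv =>
      if PySem.Dict.get? (PySem.Dict.mk kv.2) "mainnet" == some "true"
      then (mt.1.insert kv.1 kv.2, mt.2)
      else (mt.1, mt.2.insert kv.1 kv.2))
    (PySem.Dict.empty, PySem.Dict.empty)

-- one iteration of A's inner `for chain_id, contracts in chains.items()` body;
-- `for version in missing_versions` iterates a Python set whose order does not affect
-- the result (each version owns its bucket), ported in the expected-versions list order;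
-- `missing_deployments[version][category]` keys are always present, so `modify` with a
-- default is exact
def pvProcessChain (expected_versions : List String) (category : String)
    (d : PySem.Dict String (PySem.Dict String (List String)))
    (kv : String × List (String × String)) :
    PySem.Dict String (PySem.Dict String (List String)) :=
  let deployed_versions := pvDeployed kv.2
  let missing_versions := PySem.Set.diff (PySem.Set.ofList expected_versions) deployed_versions
  missing_versions.foldl
    (fun d version =>
      d.modify version PySem.Dict.empty
        (fun buckets => buckets.modify category [] (fun l => l ++ [pvChainName kv.1 kv.2])))
    d

def check_missing_deployments (contracts_json : List (String × List (String × String)))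
    (expected_versions : List String) : List (String × List (String × List String)) :=
  let missing_deployments : PySem.Dict String (PySem.Dict String (List String)) :=
    expected_versions.foldl
      (fun d version => d.insert version (PySem.Dict.mk [("mainnets", []), ("testnets", [])]))
      PySem.Dict.empty
  let mt := categorize_chains contracts_json
  let final :=
    [("mainnets", mt.1), ("testnets", mt.2)].foldl
      (fun d ct => ct.2.items.foldl (pvProcessChain expected_versions ct.1) d)
      missing_deployments
  final.items.map (fun p => (p.1, p.2.items))

-- ===== PORT B =====
def pvBucket (contracts_json : List (String × List (String × String)))
    (version : String) (want_mainnet : Bool) : List String :=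
  (contracts_json.filter (fun kv =>
      ((PySem.Dict.get? (PySem.Dict.mk kv.2) "mainnet" == some "true") == want_mainnet)
      && !(PySem.Set.contains (pvDeployed kv.2) version))).map
    (fun kv => pvChainName kv.1 kv.2)

def check_missing_deployments_alt (contracts_json : List (String × List (String × String)))
    (expected_versions : List String) : List (String × List (String × List String)) :=
  (expected_versions.foldl
    (fun d version =>
      d.insert version
        (PySem.Dict.mk [("mainnets", pvBucket contracts_json version true),
                        ("testnets", pvBucket contracts_json version false)]))
    PySem.Dict.empty).items.map (fun p => (p.1, p.2.items))

-- ===== PRECONDITION & SPEC =====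
-- Pre_ excludes association-list/list encodings with duplicate dict keys or duplicate
-- set elements: a Python dict cannot have duplicate keys and a Python set cannot have
-- duplicate elements, so such lists encode no input A is ever called on.
def Pre_check_missing_deployments (contracts_json : List (String × List (String × String))) (expected_versions : List String) : Prop :=
  (contracts_json.map Prod.fst).Nodup ∧ expected_versions.Nodup
instance (contracts_json : List (String × List (String × String))) (expected_versions : List String) : Decidable (Pre_check_missing_deployments contracts_json expected_versions) := by unfold Pre_check_missing_deployments; infer_instance

def pvWitness_check_missing_deployments : (List (String × List (String × String))) × List String :=
  ([("1", [("name", "Ethereum"), ("mainnet", "true"), ("v1", "0xA")]),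
    ("5", [("mainnet", "false"), ("v2", "0xB")])],
   ["v1", "v2"])

def Spec_check_missing_deployments (contracts_json : List (String × List (String × String))) (expected_versions : List String) (out : List (String × List (String × List String))) : Prop := out = check_missing_deployments_alt contracts_json expected_versions
instance (contracts_json : List (String × List (String × String))) (expected_versions : List String) (out : List (String × List (String × List String))) : Decidable (Spec_check_missing_deployments contracts_json expected_versions out) := by unfold Spec_check_missing_deployments; infer_instance

-- ===== CLAIM =====
def Claim_equal_check_missing_deployments : Prop := ∀ (contracts_json : List (String × List (String × String))) (expected_versions : List String), Dom_check_missing_deployments contracts_json expected_versions → Pre_check_missing_deployments contracts_json expected_versions → Spec_check_missing_deployments contracts_json expected_versions (check_missing_deployments contracts_json expected_versions)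

-- ===== LEMMAS AND PROOFS =====


lemma keys_mk_map {ν : Type} (V : List String) (g : String → ν) :
    (PySem.Dict.mk (V.map (fun v => (v, g v)))).keys = V := by
  simp only [PySem.Dict.keys,  List.map_map]
  exact List.map_id V

lemma modify_map_dict {ν : Type} (V : List String) (hV : V.Nodup) (x : String) (hx : x ∈ V)
    (g : String → ν) (d0 : ν) (F : ν → ν) :
    (PySem.Dict.mk (V.map (fun v => (v, g v)))).modify x d0 F
      = PySem.Dict.mk (V.map (fun v => (v, if v = x then F (g v) else g v))) := by
  have hkeys : (PySem.Dict.mk (V.map (fun v => (v, g v)))).keys = V := keys_mk_map V g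
  have hnd : (PySem.Dict.mk (V.map (fun v => (v, g v)))).keys.Nodup := by rw [hkeys]; exact hV
  have hcont : (PySem.Dict.mk (V.map (fun v => (v, g v)))).contains x = true := by
    rw [PySem.Dict.contains_iff_mem_keys, hkeys]; exact hx
  have hgetD : (PySem.Dict.mk (V.map (fun v => (v, g v)))).getD x d0 = g x :=
    PySem.Dict.getD_of_mem_items _ (List.mem_map_of_mem (f := fun v => (v, g v)) hx) hnd _
  rw [PySem.Dict.modify, hgetD]
  apply PySem.Dict.ext
  rw [PySem.Dict.items_insert_of_contains _ _ _]
  simp only [ List.map_map]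
  apply List.map_congr_left
  intro v hv
  by_cases h : v = x
  · subst h; simp
  · simp [Function.comp, h, beq_iff_eq]
  exact hcont

lemma foldl_modify_map {ν : Type} (ks : List String) (V : List String) (hV : V.Nodup)
    (hks : ks.Nodup) (hsub : ∀ x ∈ ks, x ∈ V) (g : String → ν) (d0 : ν) (F : ν → ν) :
    ks.foldl (fun d v => d.modify v d0 F) (PySem.Dict.mk (V.map (fun v => (v, g v))))
      = PySem.Dict.mk (V.map (fun v => (v, if v ∈ ks then F (g v) else g v))) := by
  induction ks generalizing g with
  | nil => simp
  | cons x ks' ih =>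
    simp only [List.foldl_cons]
    rw [modify_map_dict V hV x (hsub x (List.mem_cons_self)) g d0 F]
    rw [ih (List.nodup_cons.mp hks).2 (fun y hy => hsub y (List.mem_cons_of_mem x hy))]
    congr 1
    apply List.map_congr_left
    intro v hv
    have hxks' : x ∉ ks' := (List.nodup_cons.mp hks).1
    by_cases h : v = x
    · subst h
      simp [hxks']
    · by_cases h2 : v ∈ ks' <;> simp [h, h2]

lemma bucket_modify_main (a b : List String) (f : List String → List String) :
    (PySem.Dict.mk [("mainnets", a), ("testnets", b)]).modify "mainnets" [] f
      = PySem.Dict.mk [("mainnets", f a), ("testnets", b)] := by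
  simp [PySem.Dict.modify, PySem.Dict.insert, PySem.Dict.getD, PySem.Dict.get?,
    PySem.Dict.contains]

lemma bucket_modify_test (a b : List String) (f : List String → List String) :
    (PySem.Dict.mk [("mainnets", a), ("testnets", b)]).modify "testnets" [] f
      = PySem.Dict.mk [("mainnets", a), ("testnets", f b)] := by
  simp [PySem.Dict.modify, PySem.Dict.insert, PySem.Dict.getD, PySem.Dict.get?,
    PySem.Dict.contains]


-- the "mainnet" test shared by both ports
def pvIsMain (kv : String × List (String × String)) : Bool :=
  PySem.Dict.get? (PySem.Dict.mk kv.2) "mainnet" == some "true"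

-- names of the chains in `chains` that are missing version v, in list order
def pvMissNames (chains : List (String × List (String × String))) (v : String) : List String :=
  (chains.filter (fun kv => !(PySem.Set.contains (pvDeployed kv.2) v))).map
    (fun kv => pvChainName kv.1 kv.2)

lemma processChain_main (evs : List String) (kv : String × List (String × String))
    (m t : String → List String) :
    pvProcessChain evs "mainnets"
      (PySem.Dict.mk ((PySem.Set.ofList evs).map
        (fun v => (v, PySem.Dict.mk [("mainnets", m v), ("testnets", t v)])))) kv
      = PySem.Dict.mk ((PySem.Set.ofList evs).map
        (fun v => (v, PySem.Dict.mk
          [("mainnets", if PySem.Set.contains (pvDeployed kv.2) v then m v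
                        else m v ++ [pvChainName kv.1 kv.2]),
           ("testnets", t v)]))) := by
  simp only [pvProcessChain]
  rw [foldl_modify_map _ _ (PySem.Set.nodup_ofList evs)
    (PySem.Set.nodup_diff _ _ (PySem.Set.nodup_ofList evs))
    (fun x hx => ((PySem.Set.mem_diff _ _ _).mp hx).1)]
  congr 1
  apply List.map_congr_left
  intro v hv
  by_cases h : PySem.Set.contains (pvDeployed kv.2) v = true
  · have : v ∉ PySem.Set.diff (PySem.Set.ofList evs) (pvDeployed kv.2) := by
      intro hmem
      exact ((PySem.Set.mem_diff _ _ _).mp hmem).2 ((PySem.Set.contains_iff _ _).mp h)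
    simp [this, h]
    exact (PySem.Set.contains_iff _ _).mp h
  · have : v ∈ PySem.Set.diff (PySem.Set.ofList evs) (pvDeployed kv.2) := by
      exact (PySem.Set.mem_diff _ _ _).mpr ⟨hv, fun hc => h ((PySem.Set.contains_iff _ _).mpr hc)⟩
    simp [this, h, bucket_modify_main]
    exact fun hc => h ((PySem.Set.contains_iff _ _).mpr hc)

lemma processChain_test (evs : List String) (kv : String × List (String × String))
    (m t : String → List String) :
    pvProcessChain evs "testnets"
      (PySem.Dict.mk ((PySem.Set.ofList evs).map
        (fun v => (v, PySem.Dict.mk [("mainnets", m v), ("testnets", t v)])))) kv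
      = PySem.Dict.mk ((PySem.Set.ofList evs).map
        (fun v => (v, PySem.Dict.mk
          [("mainnets", m v),
           ("testnets", if PySem.Set.contains (pvDeployed kv.2) v then t v
                        else t v ++ [pvChainName kv.1 kv.2])]))) := by
  simp only [pvProcessChain]
  rw [foldl_modify_map _ _ (PySem.Set.nodup_ofList evs)
    (PySem.Set.nodup_diff _ _ (PySem.Set.nodup_ofList evs))
    (fun x hx => ((PySem.Set.mem_diff _ _ _).mp hx).1)]
  congr 1
  apply List.map_congr_left
  intro v hv
  by_cases h : PySem.Set.contains (pvDeployed kv.2) v = true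
  · have : v ∉ PySem.Set.diff (PySem.Set.ofList evs) (pvDeployed kv.2) := by
      intro hmem
      exact ((PySem.Set.mem_diff _ _ _).mp hmem).2 ((PySem.Set.contains_iff _ _).mp h)
    simp [this, h]
    exact (PySem.Set.contains_iff _ _).mp h
  · have : v ∈ PySem.Set.diff (PySem.Set.ofList evs) (pvDeployed kv.2) := by
      exact (PySem.Set.mem_diff _ _ _).mpr ⟨hv, fun hc => h ((PySem.Set.contains_iff _ _).mpr hc)⟩
    simp [this, h, bucket_modify_test]
    exact fun hc => h ((PySem.Set.contains_iff _ _).mpr hc)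

lemma pass_main (chains : List (String × List (String × String))) (evs : List String)
    (m t : String → List String) :
    chains.foldl (pvProcessChain evs "mainnets")
      (PySem.Dict.mk ((PySem.Set.ofList evs).map
        (fun v => (v, PySem.Dict.mk [("mainnets", m v), ("testnets", t v)]))))
      = PySem.Dict.mk ((PySem.Set.ofList evs).map
        (fun v => (v, PySem.Dict.mk
          [("mainnets", m v ++ pvMissNames chains v), ("testnets", t v)]))) := by
  induction chains generalizing m with
  | nil => simp [pvMissNames]
  | cons kv chains' ih =>
    simp only [List.foldl_cons]
    rw [processChain_main]
    rw [ih]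
    congr 1
    apply List.map_congr_left
    intro v hv
    by_cases h : v ∈ pvDeployed kv.2 <;>
      simp [h, pvMissNames, PySem.Set.contains_iff]

lemma pass_test (chains : List (String × List (String × String))) (evs : List String)
    (m t : String → List String) :
    chains.foldl (pvProcessChain evs "testnets")
      (PySem.Dict.mk ((PySem.Set.ofList evs).map
        (fun v => (v, PySem.Dict.mk [("mainnets", m v), ("testnets", t v)]))))
      = PySem.Dict.mk ((PySem.Set.ofList evs).map
        (fun v => (v, PySem.Dict.mk
          [("mainnets", m v), ("testnets", t v ++ pvMissNames chains v)]))) := by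
  induction chains generalizing t with
  | nil => simp [pvMissNames]
  | cons kv chains' ih =>
    simp only [List.foldl_cons]
    rw [processChain_test]
    rw [ih]
    congr 1
    apply List.map_congr_left
    intro v hv
    by_cases h : v ∈ pvDeployed kv.2 <;>
      simp [h, pvMissNames, PySem.Set.contains_iff]

lemma categorize_aux (cj : List (String × List (String × String)))
    (d1 d2 : PySem.Dict String (List (String × String)))
    (hnd : (cj.map Prod.fst).Nodup)
    (h1 : ∀ kv ∈ cj, d1.contains kv.1 = false)
    (h2 : ∀ kv ∈ cj, d2.contains kv.1 = false) :
    cj.foldl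
      (fun mt kv =>
        if PySem.Dict.get? (PySem.Dict.mk kv.2) "mainnet" == some "true"
        then (mt.1.insert kv.1 kv.2, mt.2)
        else (mt.1, mt.2.insert kv.1 kv.2)) (d1, d2)
      = (PySem.Dict.mk (d1.items ++ cj.filter pvIsMain),
         PySem.Dict.mk (d2.items ++ cj.filter (fun kv => !pvIsMain kv))) := by
  induction cj generalizing d1 d2 with
  | nil => simp
  | cons kv cj' ih =>
    have hnd' : (cj'.map Prod.fst).Nodup := (List.nodup_cons.mp hnd).2
    have hfresh : kv.1 ∉ cj'.map Prod.fst := (List.nodup_cons.mp hnd).1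
    simp only [List.foldl_cons]
    by_cases hm : pvIsMain kv = true
    · rw [if_pos (by simpa [pvIsMain] using hm)]
      rw [ih _ _ hnd'
        (fun kv' h' => by
          rw [PySem.Dict.contains_insert]
          have : (kv'.1 == kv.1) = false := by
            simp only [beq_eq_false_iff_ne, ne_eq]
            intro hc
            exact hfresh (hc ▸ List.mem_map_of_mem h')
          rw [this, h1 kv' (List.mem_cons_of_mem kv h'), Bool.or_self]
        )
        (fun kv' h' => h2 kv' (List.mem_cons_of_mem kv h'))]
      rw [PySem.Dict.items_insert_of_not_contains _ _ (h1 kv List.mem_cons_self)]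
      simp [List.filter_cons, hm]
    · rw [if_neg (by simpa [pvIsMain] using hm)]
      rw [ih _ _ hnd'
        (fun kv' h' => h1 kv' (List.mem_cons_of_mem kv h'))
        (fun kv' h' => by
          rw [PySem.Dict.contains_insert]
          have : (kv'.1 == kv.1) = false := by
            simp only [beq_eq_false_iff_ne, ne_eq]
            intro hc
            exact hfresh (hc ▸ List.mem_map_of_mem h')
          rw [this, h2 kv' (List.mem_cons_of_mem kv h'), Bool.or_self]
        )]
      rw [PySem.Dict.items_insert_of_not_contains _ _ (h2 kv List.mem_cons_self)]
      simp [List.filter_cons, hm]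

lemma categorize_eq (cj : List (String × List (String × String)))
    (hnd : (cj.map Prod.fst).Nodup) :
    categorize_chains cj
      = (PySem.Dict.mk (cj.filter pvIsMain),
         PySem.Dict.mk (cj.filter (fun kv => !pvIsMain kv))) := by
  unfold categorize_chains
  rw [categorize_aux cj PySem.Dict.empty PySem.Dict.empty hnd
    (fun _ _ => PySem.Dict.contains_empty _) (fun _ _ => PySem.Dict.contains_empty _)]
  simp [PySem.Dict.empty]

lemma foldl_insert_const_fresh {ν : Type} (evs : List String) (hnd : evs.Nodup)
    (val : String → ν) :
    evs.foldl (fun d v => d.insert v (val v)) PySem.Dict.empty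
      = PySem.Dict.mk (evs.map (fun v => (v, val v))) := by
  apply PySem.Dict.ext
  have h := PySem.Dict.items_foldl_insert_fresh evs (fun s => s) val PySem.Dict.empty
    (fun a _ => PySem.Dict.contains_empty _) (by simpa using hnd)
  simpa [PySem.Dict.empty] using h


lemma bucket_true (cj : List (String × List (String × String))) (v : String) :
    pvBucket cj v true = pvMissNames (cj.filter pvIsMain) v := by
  unfold pvBucket pvMissNames
  rw [List.filter_filter]
  congr 1
  apply List.filter_congr
  intro kv _
  cases h : pvIsMain kv <;> simp [pvIsMain] at h <;> simp [h]

lemma bucket_false (cj : List (String × List (String × String))) (v : String) :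
    pvBucket cj v false = pvMissNames (cj.filter (fun kv => !pvIsMain kv)) v := by
  unfold pvBucket pvMissNames
  rw [List.filter_filter]
  congr 1
  apply List.filter_congr
  intro kv _
  cases h : pvIsMain kv <;> simp [pvIsMain] at h <;> simp [h]

-- ===== VERDICT =====
theorem check_missing_deployments_spec : Claim_equal_check_missing_deployments := by
  unfold Claim_equal_check_missing_deployments
  intro cj evs _ hpre
  obtain ⟨hcj, hev⟩ := hpre
  unfold Spec_check_missing_deployments
  simp only [check_missing_deployments, check_missing_deployments_alt]
  rw [categorize_eq cj hcj]
  rw [foldl_insert_const_fresh evs hev, foldl_insert_const_fresh evs hev]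
  simp only [List.foldl_cons, List.foldl_nil]
  have hof := PySem.Set.ofList_eq_self_of_nodup evs hev
  have hA := pass_main (cj.filter pvIsMain) evs (fun _ => ([] : List String)) (fun _ => ([] : List String))
  rw [hof] at hA
  rw [hA]
  have hB := pass_test (cj.filter (fun kv => !pvIsMain kv)) evs
      (fun v => ([] : List String) ++ pvMissNames (cj.filter pvIsMain) v) (fun _ => ([] : List String))
  rw [hof] at hB
  rw [hB]
  simp only [List.map_map]
  apply List.map_congr_left
  intro v hv
  simp [bucket_true, bucket_false]
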